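-- pv_equiv track=rewrite | github.com/nikittank/Startup-Pitch-Text-Evaluation-with-NLP | src/nlp_analyzer.py | _classify_team_metric
-- ===== SOURCE A (Python) =====
-- def _classify_team_metric(pattern: str, context: str) -> str:
--     """
--     Classify team metric based on pattern and context.
--
--     Args:
--         pattern: Regex pattern that matched
--         context: Text context around the match
--
--     Returns:
--         Team metric classification
--     """
--     pattern_lower = pattern.lower()
--     context_lower = context.lower()
--
--     if 'years' in pattern_lower:
--         return 'experience_years'
--     elif any(word in pattern_lower for word in ['university', 'college', 'phd', 'mba', 'degree']):
--         return 'education'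
--     elif any(word in context_lower for word in ['founder', 'ceo', 'cto', 'vp', 'director']):
--         return 'leadership_background'
--     elif any(word in pattern_lower for word in ['expert', 'specialist', 'expertise', 'authority']):
--         return 'domain_expertise'
--     elif any(word in pattern_lower for word in ['recognized', 'awarded', 'speaker', 'keynote']):
--         return 'industry_recognition'
--     else:
--         return 'background_company'
-- ===== SOURCE B (Python) =====
-- # B: no ordered rule chain -- scan a flat keyword map, aggregate the minimum
-- # matched priority with min(), then index a label table (order-independent scan).
-- _KEYWORDS = {
--     'years': (0, 0),
--     'university': (1, 0), 'college': (1, 0), 'phd': (1, 0), 'mba': (1, 0), 'degree': (1, 0),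
--     'founder': (2, 1), 'ceo': (2, 1), 'cto': (2, 1), 'vp': (2, 1), 'director': (2, 1),
--     'expert': (3, 0), 'specialist': (3, 0), 'expertise': (3, 0), 'authority': (3, 0),
--     'recognized': (4, 0), 'awarded': (4, 0), 'speaker': (4, 0), 'keynote': (4, 0),
-- }
-- _LABELS = ['experience_years', 'education', 'leadership_background',
--            'domain_expertise', 'industry_recognition', 'background_company']
--
--
-- def _classify_team_metric(pattern: str, context: str) -> str:
--     texts = (pattern.lower(), context.lower())
--     best = 5
--     for word, (prio, src) in _KEYWORDS.items():
--         if word in texts[src]: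
--             best = min(best, prio)
--     return _LABELS[best]
-- ===== Notes on version B (the rewrite author's own statement) =====
-- stated objective: alternative
-- what changed: Replaced the lazy first-match if/elif chain by an order-independent full scan of a flat keyword->(priority,source) map that aggregates the minimum matched priority and indexes a label table with it.
import Mathlib
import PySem

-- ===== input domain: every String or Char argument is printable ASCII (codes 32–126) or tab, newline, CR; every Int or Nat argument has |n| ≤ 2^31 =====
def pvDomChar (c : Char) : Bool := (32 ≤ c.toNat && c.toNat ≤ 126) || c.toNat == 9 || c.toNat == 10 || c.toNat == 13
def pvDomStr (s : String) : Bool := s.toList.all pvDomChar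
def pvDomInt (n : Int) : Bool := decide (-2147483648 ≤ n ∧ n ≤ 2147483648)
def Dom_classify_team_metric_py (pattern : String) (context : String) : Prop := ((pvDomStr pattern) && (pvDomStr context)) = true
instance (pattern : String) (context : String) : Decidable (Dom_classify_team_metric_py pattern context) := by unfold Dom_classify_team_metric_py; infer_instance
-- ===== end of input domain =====

-- B replaces A's lazy first-match if/elif chain by an order-independent scan of a flat
-- keyword→(priority, source) map aggregating the minimum matched priority (objective: alternative; same cost).

-- ===== PORT A =====
def classify_team_metric_py (pattern : String) (context : String) : String :=
  let pattern_lower := PySem.Str.lower pattern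
  let context_lower := PySem.Str.lower context
  if PySem.Str.isIn "years" pattern_lower then "experience_years"
  else if ["university", "college", "phd", "mba", "degree"].any
      (fun word => PySem.Str.isIn word pattern_lower) then "education"
  else if ["founder", "ceo", "cto", "vp", "director"].any
      (fun word => PySem.Str.isIn word context_lower) then "leadership_background"
  else if ["expert", "specialist", "expertise", "authority"].any
      (fun word => PySem.Str.isIn word pattern_lower) then "domain_expertise"
  else if ["recognized", "awarded", "speaker", "keynote"].any
      (fun word => PySem.Str.isIn word pattern_lower) then "industry_recognition"
  else "background_company"

-- ===== PORT B =====
-- flat keyword map: (word, priority, source is pattern?); mirrors Source B's _KEYWORDS (src 0 = pattern)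
def pvKeywords : List (String × Nat × Bool) :=
  [ ("years", 0, true),
    ("university", 1, true), ("college", 1, true), ("phd", 1, true), ("mba", 1, true), ("degree", 1, true),
    ("founder", 2, false), ("ceo", 2, false), ("cto", 2, false), ("vp", 2, false), ("director", 2, false),
    ("expert", 3, true), ("specialist", 3, true), ("expertise", 3, true), ("authority", 3, true),
    ("recognized", 4, true), ("awarded", 4, true), ("speaker", 4, true), ("keynote", 4, true) ]

def pvLabels : List String :=
  ["experience_years", "education", "leadership_background",
   "domain_expertise", "industry_recognition", "background_company"]

-- loop body: if word in texts[src]: best = min(best, prio)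
def pvStep (p c : String) (b : Nat) (e : String × Nat × Bool) : Nat :=
  if PySem.Str.isIn e.1 (cond e.2.2 p c) then min b e.2.1 else b

def classify_team_metric_py_alt (pattern : String) (context : String) : String :=
  let p := PySem.Str.lower pattern
  let c := PySem.Str.lower context
  -- _LABELS[best]: best is always in [0,5], so the Python index never raises; getD is exact here
  pvLabels.getD (pvKeywords.foldl (pvStep p c) 5) "background_company"

-- ===== PRECONDITION & SPEC =====
def Spec_classify_team_metric_py (pattern : String) (context : String) (out : String) : Prop := out = classify_team_metric_py_alt pattern context
instance (pattern : String) (context : String) (out : String) : Decidable (Spec_classify_team_metric_py pattern context out) := by unfold Spec_classify_team_metric_py; infer_instance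

-- ===== CLAIM (what is proved, stated in full; the proofs are below) =====
def Claim_equal_classify_team_metric_py : Prop := ∀ (pattern : String) (context : String), Dom_classify_team_metric_py pattern context → Spec_classify_team_metric_py pattern context (classify_team_metric_py pattern context)

-- ===== LEMMAS AND PROOFS =====

theorem pv_foldl_le (p c : String) (es : List (String × Nat × Bool)) :
    ∀ b : Nat, es.foldl (pvStep p c) b ≤ b := by
  induction es with
  | nil => intro b; simp
  | cons e es ih =>
    intro b
    simp only [List.foldl]
    exact le_trans (ih _) (by unfold pvStep; split <;> omega)

theorem pv_foldl_min (p c : String) (es : List (String × Nat × Bool)) :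
    ∀ b1 b2 : Nat, es.foldl (pvStep p c) (min b1 b2) = min b1 (es.foldl (pvStep p c) b2) := by
  induction es with
  | nil => intro b1 b2; simp
  | cons e es ih =>
    intro b1 b2
    simp only [List.foldl]
    have h : pvStep p c (min b1 b2) e = min b1 (pvStep p c b2 e) := by
      unfold pvStep; split <;> omega
    rw [h]; exact ih b1 _

theorem pv_foldl_app (p c : String) (es1 es2 : List (String × Nat × Bool)) :
    (es1 ++ es2).foldl (pvStep p c) 5 =
      min (es1.foldl (pvStep p c) 5) (es2.foldl (pvStep p c) 5) := by
  rw [List.foldl_append]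
  conv_lhs => rw [(Nat.min_eq_left (pv_foldl_le p c es1 5)).symm]
  exact pv_foldl_min p c es2 _ 5

theorem pvG0 (p c : String) :
    ([("years", 0, true)] : List (String × Nat × Bool)).foldl (pvStep p c) 5 =
      if PySem.Str.isIn "years" p then 0 else 5 := by
  cases h : PySem.Str.isIn "years" p <;>
    simp only [List.foldl, pvStep, h, Bool.cond_true, Bool.cond_false] <;> decide

theorem pvG1 (p c : String) :
    ([("university", 1, true), ("college", 1, true), ("phd", 1, true), ("mba", 1, true),
      ("degree", 1, true)] : List (String × Nat × Bool)).foldl (pvStep p c) 5 =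
      if ["university", "college", "phd", "mba", "degree"].any
          (fun word => PySem.Str.isIn word p) then 1 else 5 := by
  cases h1 : PySem.Str.isIn "university" p <;> cases h2 : PySem.Str.isIn "college" p <;>
    cases h3 : PySem.Str.isIn "phd" p <;> cases h4 : PySem.Str.isIn "mba" p <;>
    cases h5 : PySem.Str.isIn "degree" p <;>
    simp only [List.foldl, pvStep, h1, h2, h3, h4, h5, List.any_cons, List.any_nil,
      Bool.cond_true, Bool.cond_false, Bool.or_false, Bool.or_true, Bool.false_or,
      Bool.true_or] <;> decide

theorem pvG2 (p c : String) :
    ([("founder", 2, false), ("ceo", 2, false), ("cto", 2, false), ("vp", 2, false),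
      ("director", 2, false)] : List (String × Nat × Bool)).foldl (pvStep p c) 5 =
      if ["founder", "ceo", "cto", "vp", "director"].any
          (fun word => PySem.Str.isIn word c) then 2 else 5 := by
  cases h1 : PySem.Str.isIn "founder" c <;> cases h2 : PySem.Str.isIn "ceo" c <;>
    cases h3 : PySem.Str.isIn "cto" c <;> cases h4 : PySem.Str.isIn "vp" c <;>
    cases h5 : PySem.Str.isIn "director" c <;>
    simp only [List.foldl, pvStep, h1, h2, h3, h4, h5, List.any_cons, List.any_nil,
      Bool.cond_true, Bool.cond_false, Bool.or_false, Bool.or_true, Bool.false_or,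
      Bool.true_or] <;> decide

theorem pvG3 (p c : String) :
    ([("expert", 3, true), ("specialist", 3, true), ("expertise", 3, true),
      ("authority", 3, true)] : List (String × Nat × Bool)).foldl (pvStep p c) 5 =
      if ["expert", "specialist", "expertise", "authority"].any
          (fun word => PySem.Str.isIn word p) then 3 else 5 := by
  cases h1 : PySem.Str.isIn "expert" p <;> cases h2 : PySem.Str.isIn "specialist" p <;>
    cases h3 : PySem.Str.isIn "expertise" p <;> cases h4 : PySem.Str.isIn "authority" p <;>
    simp only [List.foldl, pvStep, h1, h2, h3, h4, List.any_cons, List.any_nil,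
      Bool.cond_true, Bool.cond_false, Bool.or_false, Bool.or_true, Bool.false_or,
      Bool.true_or] <;> decide

theorem pvG4 (p c : String) :
    ([("recognized", 4, true), ("awarded", 4, true), ("speaker", 4, true),
      ("keynote", 4, true)] : List (String × Nat × Bool)).foldl (pvStep p c) 5 =
      if ["recognized", "awarded", "speaker", "keynote"].any
          (fun word => PySem.Str.isIn word p) then 4 else 5 := by
  cases h1 : PySem.Str.isIn "recognized" p <;> cases h2 : PySem.Str.isIn "awarded" p <;>
    cases h3 : PySem.Str.isIn "speaker" p <;> cases h4 : PySem.Str.isIn "keynote" p <;>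
    simp only [List.foldl, pvStep, h1, h2, h3, h4, List.any_cons, List.any_nil,
      Bool.cond_true, Bool.cond_false, Bool.or_false, Bool.or_true, Bool.false_or,
      Bool.true_or] <;> decide

theorem pv_best_eq (p c : String) :
    pvKeywords.foldl (pvStep p c) 5 =
      min (if PySem.Str.isIn "years" p then 0 else 5)
        (min (if ["university", "college", "phd", "mba", "degree"].any
                  (fun word => PySem.Str.isIn word p) then 1 else 5)
          (min (if ["founder", "ceo", "cto", "vp", "director"].any
                    (fun word => PySem.Str.isIn word c) then 2 else 5)
            (min (if ["expert", "specialist", "expertise", "authority"].any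
                      (fun word => PySem.Str.isIn word p) then 3 else 5)
              (if ["recognized", "awarded", "speaker", "keynote"].any
                  (fun word => PySem.Str.isIn word p) then 4 else 5)))) := by
  rw [show pvKeywords =
      [("years", 0, true)] ++
      ([("university", 1, true), ("college", 1, true), ("phd", 1, true), ("mba", 1, true),
        ("degree", 1, true)] ++
       ([("founder", 2, false), ("ceo", 2, false), ("cto", 2, false), ("vp", 2, false),
         ("director", 2, false)] ++
        ([("expert", 3, true), ("specialist", 3, true), ("expertise", 3, true),
          ("authority", 3, true)] ++
         [("recognized", 4, true), ("awarded", 4, true), ("speaker", 4, true),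
          ("keynote", 4, true)]))) from rfl,
    pv_foldl_app, pv_foldl_app, pv_foldl_app, pv_foldl_app, pvG0, pvG1, pvG2, pvG3, pvG4]

-- ===== VERDICT (by name: the statement is the Claim_ definition above) =====
theorem classify_team_metric_py_spec : Claim_equal_classify_team_metric_py := by
  intro pattern context _
  unfold Spec_classify_team_metric_py classify_team_metric_py classify_team_metric_py_alt
  simp only [pv_best_eq]
  generalize PySem.Str.isIn "years" (PySem.Str.lower pattern) = g0
  generalize (["university", "college", "phd", "mba", "degree"].any
      (fun word => PySem.Str.isIn word (PySem.Str.lower pattern))) = g1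
  generalize (["founder", "ceo", "cto", "vp", "director"].any
      (fun word => PySem.Str.isIn word (PySem.Str.lower context))) = g2
  generalize (["expert", "specialist", "expertise", "authority"].any
      (fun word => PySem.Str.isIn word (PySem.Str.lower pattern))) = g3
  generalize (["recognized", "awarded", "speaker", "keynote"].any
      (fun word => PySem.Str.isIn word (PySem.Str.lower pattern))) = g4
  revert g0 g1 g2 g3 g4
  decide
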